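-- pv_equiv track=rewrite | github.com/JBKing514/AutoEhHunter | Docker/compute/hunterAgent/skills/recommendation.py | _extract_source_urls
-- ===== SOURCE A (Python) =====
-- from typing import Any, Dict, List, Optional, Sequence
--
-- def _extract_source_urls(tags: Sequence[str]) -> tuple[str, str]:
--     eh_url = ""
--     ex_url = ""
--     for tag in tags or []:
--         s = str(tag or "").strip()
--         if not s.lower().startswith("source:"):
--             continue
--         v = s.split(":", 1)[1].strip()
--         if not v:
--             continue
--         if not v.startswith("http://") and not v.startswith("https://"):
--             v = f"https://{v}"
--         if "exhentai.org" in v: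
--             ex_url = ex_url or v
--         elif "e-hentai.org" in v:
--             eh_url = eh_url or v
--     return eh_url, ex_url
-- ===== SOURCE B (Python) =====
-- def _candidate(tag):
--     s = str(tag or "").strip()
--     if not s.lower().startswith("source:"):
--         return None
--     v = s.split(":", 1)[1].strip()
--     if not v:
--         return None
--     return v if v.startswith(("http://", "https://")) else "https://" + v
--
--
-- def _extract_source_urls(tags):
--     cands = [c for c in map(_candidate, tags or []) if c is not None]
--     ex_url = next((v for v in cands if "exhentai.org" in v), "")
--     eh_url = next((v for v in cands if "e-hentai.org" in v and "exhentai.org" not in v), "")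
--     return eh_url, ex_url
-- ===== Notes on version B (the rewrite author's own statement) =====
-- stated objective: simpler
-- what changed: Replaces the single stateful accumulating loop (with 'x or v' first-wins updates and an elif precedence) by a build-then-scan decomposition: first collect the normalized candidate URLs via a filtering helper, then find the first exhentai match and the first e-hentai-but-not-exhentai match separately.
import Mathlib
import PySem

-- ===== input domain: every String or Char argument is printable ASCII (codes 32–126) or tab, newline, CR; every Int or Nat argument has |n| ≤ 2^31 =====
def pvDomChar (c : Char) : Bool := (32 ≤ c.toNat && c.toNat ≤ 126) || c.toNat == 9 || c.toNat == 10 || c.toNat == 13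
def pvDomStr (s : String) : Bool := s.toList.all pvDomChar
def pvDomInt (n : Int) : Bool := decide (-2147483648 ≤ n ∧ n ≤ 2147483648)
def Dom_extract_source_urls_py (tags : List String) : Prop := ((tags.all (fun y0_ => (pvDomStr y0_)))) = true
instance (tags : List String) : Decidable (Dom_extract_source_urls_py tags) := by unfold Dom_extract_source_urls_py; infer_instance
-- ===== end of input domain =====

-- B replaces A's single stateful accumulating loop by a simpler build-then-scan decomposition
-- (collect normalized candidates, then two targeted first-match searches); objective: simpler.

-- ===== PORT A =====
-- loop body of A, over state (eh_url, ex_url).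
-- s.split(":", 1)[1]: index 1 always exists here because s lowercased starts with "source:",
-- so s contains ':' and the split has two parts; .getD 1 "" is exact on that path.
def pvStepA (st : String × String) (tag : String) : String × String :=
  let s := PySem.Str.strip (if tag = "" then "" else tag)
  if !(PySem.Str.startswith (PySem.Str.lower s) "source:") then st
  else
    let v := PySem.Str.strip (((PySem.Str.splitMax? s ":" 1).getD []).getD 1 "")
    if v = "" then st
    else
      let v := if !(PySem.Str.startswith v "http://") && !(PySem.Str.startswith v "https://")
               then "https://" ++ v else v
      if PySem.Str.isIn "exhentai.org" v then
        (st.1, if st.2 = "" then v else st.2)     -- ex_url = ex_url or v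
      else if PySem.Str.isIn "e-hentai.org" v then
        ((if st.1 = "" then v else st.1), st.2)   -- eh_url = eh_url or v
      else st

def extract_source_urls_py (tags : List String) : String × String :=
  tags.foldl pvStepA ("", "")

-- ===== PORT B =====
-- _candidate(tag): the normalized source URL of one tag, or none.
def pvCand (tag : String) : Option String :=
  let s := PySem.Str.strip (if tag = "" then "" else tag)
  if !(PySem.Str.startswith (PySem.Str.lower s) "source:") then none
  else
    let v := PySem.Str.strip (((PySem.Str.splitMax? s ":" 1).getD []).getD 1 "")
    if v = "" then none
    else some (if PySem.Str.startswith v "http://" || PySem.Str.startswith v "https://"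
               then v else "https://" ++ v)

def extract_source_urls_py_alt (tags : List String) : String × String :=
  let cands := tags.filterMap pvCand
  let ex_url := (cands.find? (fun v => PySem.Str.isIn "exhentai.org" v)).getD ""
  let eh_url := (cands.find? (fun v =>
      PySem.Str.isIn "e-hentai.org" v && !PySem.Str.isIn "exhentai.org" v)).getD ""
  (eh_url, ex_url)

-- ===== PRECONDITION & SPEC =====
def Spec_extract_source_urls_py (tags : List String) (out : String × String) : Prop := out = extract_source_urls_py_alt tags
instance (tags : List String) (out : String × String) : Decidable (Spec_extract_source_urls_py tags out) := by unfold Spec_extract_source_urls_py; infer_instance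

-- ===== CLAIM (what is proved, stated in full; the proofs are below) =====
def Claim_equal_extract_source_urls_py : Prop := ∀ (tags : List String), Dom_extract_source_urls_py tags → Spec_extract_source_urls_py tags (extract_source_urls_py tags)

-- ===== LEMMAS AND PROOFS =====

def pvOr (a b : String) : String := if a = "" then b else a

def pvPEx (v : String) : Bool := PySem.Str.isIn "exhentai.org" v
def pvPEh (v : String) : Bool := PySem.Str.isIn "e-hentai.org" v && !PySem.Str.isIn "exhentai.org" v

theorem pv_if_self (tag : String) : (if tag = "" then "" else tag) = tag := by
  split_ifs with h
  · exact h.symm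
  · rfl

-- A's loop body, expressed through B's candidate helper.
theorem pvStepA_eq (st : String × String) (tag : String) :
    pvStepA st tag =
      match pvCand tag with
      | none => st
      | some v =>
          if pvPEx v then (st.1, pvOr st.2 v)
          else if pvPEh v then (pvOr st.1 v, st.2)
          else st := by
  unfold pvStepA pvCand pvPEx pvPEh
  rw [pv_if_self]
  by_cases h1 : PySem.Str.startswith (PySem.Str.lower (PySem.Str.strip tag)) "source:" = true
  · simp only [h1, Bool.not_true, Bool.false_eq_true, if_false]
    by_cases h2 : PySem.Str.strip (((PySem.Str.splitMax? (PySem.Str.strip tag) ":" 1).getD []).getD 1 "") = ""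
    · rw [if_pos h2, if_pos h2]
    · simp only [if_neg h2]
      set v0 := PySem.Str.strip (((PySem.Str.splitMax? (PySem.Str.strip tag) ":" 1).getD []).getD 1 "") with hv0
      have hw : (if (!PySem.Str.startswith v0 "http://" && !PySem.Str.startswith v0 "https://") = true
                 then "https://" ++ v0 else v0) =
                (if (PySem.Str.startswith v0 "http://" || PySem.Str.startswith v0 "https://") = true
                 then v0 else "https://" ++ v0) := by
        cases hp : PySem.Str.startswith v0 "http://" <;>
          cases hq : PySem.Str.startswith v0 "https://" <;> simp
      rw [hw]
      set w := (if (PySem.Str.startswith v0 "http://" || PySem.Str.startswith v0 "https://") = true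
                then v0 else "https://" ++ v0) with hwdef
      cases hc : PySem.Str.isIn "exhentai.org" w <;> simp [pvOr]
  · have h1' : (!PySem.Str.startswith (PySem.Str.lower (PySem.Str.strip tag)) "source:") = true := by
      simpa using h1
    simp only [h1', if_true]

theorem pvCand_ne_empty (tag v : String) (h : pvCand tag = some v) : v ≠ "" := by
  unfold pvCand at h
  rw [pv_if_self] at h
  by_cases h1 : (!PySem.Str.startswith (PySem.Str.lower (PySem.Str.strip tag)) "source:") = true
  · rw [if_pos h1] at h; exact absurd h (by simp)
  · rw [if_neg h1] at h
    set v0 := PySem.Str.strip (((PySem.Str.splitMax? (PySem.Str.strip tag) ":" 1).getD []).getD 1 "") with hv0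
    by_cases h2 : v0 = ""
    · rw [if_pos h2] at h; exact absurd h (by simp)
    · rw [if_neg h2] at h
      have hv := Option.some.inj h
      subst hv
      split_ifs with h3
      · exact h2
      · intro he
        have hl := congrArg String.length he
        rw [String.length_append] at hl
        simp at hl

theorem pvOr_absorb (ex v y : String) (hv : v ≠ "") : pvOr (pvOr ex v) y = pvOr ex v := by
  unfold pvOr
  split_ifs <;> simp_all

theorem pvFold_eq (tags : List String) : ∀ eh ex : String,
    tags.foldl pvStepA (eh, ex) =
      (pvOr eh (((tags.filterMap pvCand).find? pvPEh).getD ""),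
       pvOr ex (((tags.filterMap pvCand).find? pvPEx).getD "")) := by
  induction tags with
  | nil => intro eh ex; simp [pvOr]
  | cons t ts ih =>
    intro eh ex
    rw [List.foldl_cons, List.filterMap_cons, pvStepA_eq]
    cases h : pvCand t with
    | none => exact ih eh ex
    | some v =>
      have hv : v ≠ "" := pvCand_ne_empty t v h
      by_cases hx : pvPEx v = true
      · have hh : pvPEh v = false := by
          unfold pvPEx at hx
          unfold pvPEh
          rw [hx, Bool.not_true, Bool.and_false]
        simp only [hx, if_true, ih, List.find?_cons, hh, Option.getD_some]
        rw [pvOr_absorb ex v _ hv]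
      · have hx' : pvPEx v = false := by simpa using hx
        by_cases hh : pvPEh v = true
        · simp only [hx', Bool.false_eq_true, if_false, hh, if_true, ih, List.find?_cons,
            Option.getD_some]
          rw [pvOr_absorb eh v _ hv]
        · have hh' : pvPEh v = false := by simpa using hh
          simp only [hx', hh', Bool.false_eq_true, if_false, ih, List.find?_cons]

-- ===== VERDICT (by name: the statement is the Claim_ definition above) =====
theorem extract_source_urls_py_spec : Claim_equal_extract_source_urls_py := by
  intro tags _
  unfold Spec_extract_source_urls_py extract_source_urls_py extract_source_urls_py_alt
  have h1 : ∀ b : String, pvOr "" b = b := fun b => by simp [pvOr]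
  rw [pvFold_eq, h1, h1]
  rfl
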